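-- pv_equiv track=rewrite | github.com/mogartio/Algo1 | tp1-fifteen/logica.py | esta_ganado
-- ===== SOURCE A (Python) =====
-- CANTIDAD_FILAS = 4
--
-- CANTIDAD_COL = 4
--
-- def esta_ganado(tablero):
-- 	"""Recibe el tablero y devuelve True si está ordenado de menor a mayor y False de no ser así"""
--
-- 	for i in range(CANTIDAD_FILAS):
-- 		for j in range(CANTIDAD_COL - 1):
-- 			if tablero[i][j] > tablero[i][j+1]:
-- 				return False
-- 		if i != CANTIDAD_FILAS - 1 and tablero[i][0] > tablero[i+1][0]:
-- 			return False
-- 	return True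
-- ===== SOURCE B (Python) =====
-- CANTIDAD_FILAS = 4
--
-- CANTIDAD_COL = 4
--
-- def esta_ganado(tablero):
-- 	"""Recibe el tablero y devuelve True si está ordenado de menor a mayor y False de no ser así"""
-- 	for i in range(CANTIDAD_FILAS):
-- 		fila = tablero[i][:CANTIDAD_COL]
-- 		if fila != sorted(fila):
-- 			return False
-- 	primera = [tablero[i][0] for i in range(CANTIDAD_FILAS)]
-- 	return primera == sorted(primera)
-- ===== Notes on version B (the rewrite author's own statement) =====
-- stated objective: alternative
-- what changed: Replaced the interleaved adjacent-pair scan with early returns by comparing each row's first-4 slice, and then the first-column list, against its own sorted() copy.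
-- outside the precondition, e.g. on esta_ganado([[1, 2, 3, 4], [0, 1, 2]]): A returns False, B raises IndexError
import Mathlib
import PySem

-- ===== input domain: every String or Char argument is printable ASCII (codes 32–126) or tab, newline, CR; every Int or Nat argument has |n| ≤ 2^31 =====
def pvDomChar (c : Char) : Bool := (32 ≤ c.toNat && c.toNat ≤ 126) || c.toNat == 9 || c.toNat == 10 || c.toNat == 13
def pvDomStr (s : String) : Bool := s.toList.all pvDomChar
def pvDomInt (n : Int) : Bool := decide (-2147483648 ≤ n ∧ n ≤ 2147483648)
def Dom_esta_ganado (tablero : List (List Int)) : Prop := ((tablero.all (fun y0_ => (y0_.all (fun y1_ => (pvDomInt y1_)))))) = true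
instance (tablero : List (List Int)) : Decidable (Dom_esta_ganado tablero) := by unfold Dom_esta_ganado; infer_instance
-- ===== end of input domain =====

-- B replaces A's interleaved adjacent-pair scan by sort-and-compare on each row's first-4 slice
-- and on the first column (objective: alternative decomposition, same cost on the fixed 4x4 board).

-- ===== PORT A =====
-- A-side helper: tablero[i][j]; the none (= IndexError) case is excluded by Pre_, defaulted to 0
def pvCellA (t : List (List Int)) (i j : Int) : Int :=
  (PySem.List.pyGet? ((PySem.List.pyGet? t i).getD []) j).getD 0

-- inner loop: 'for j in range(CANTIDAD_COL - 1): if tablero[i][j] > tablero[i][j+1]: return False'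
def pvRowViolA (t : List (List Int)) (i : Int) (j : Nat) : Bool :=
  if j < 3 then
    if pvCellA t i (j : Int) > pvCellA t i ((j : Int) + 1) then true
    else pvRowViolA t i (j + 1)
  else false
termination_by 3 - j

-- outer loop: 'for i in range(CANTIDAD_FILAS): …'
def pvLoopA (t : List (List Int)) (i : Nat) : Bool :=
  if i < 4 then
    if pvRowViolA t (i : Int) 0 then false
    else if i ≠ 3 && (pvCellA t (i : Int) 0 > pvCellA t ((i : Int) + 1) 0) then false
    else pvLoopA t (i + 1)
  else true
termination_by 4 - i

def esta_ganado (tablero : List (List Int)) : Bool := pvLoopA tablero 0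

-- ===== PORT B =====
-- B-side helper: tablero[i][j]; the none (= IndexError) case is excluded by Pre_, defaulted to 0
def pvCellB (t : List (List Int)) (i j : Int) : Int :=
  (PySem.List.pyGet? ((PySem.List.pyGet? t i).getD []) j).getD 0

-- 'for i in range(CANTIDAD_FILAS): fila = tablero[i][:CANTIDAD_COL]; if fila != sorted(fila): return False'
def pvLoopB (t : List (List Int)) (i : Nat) : Bool :=
  if i < 4 then
    let fila := PySem.List.slice ((PySem.List.pyGet? t (i : Int)).getD []) none (some 4)
    if fila ≠ PySem.List.sorted fila (fun x => x) false then false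
    else pvLoopB t (i + 1)
  else true
termination_by 4 - i

-- 'primera = [tablero[i][0] for i in range(CANTIDAD_FILAS)]; return primera == sorted(primera)'
def esta_ganado_alt (tablero : List (List Int)) : Bool :=
  if pvLoopB tablero 0 then
    let primera := (PySem.List.pyRange 0 4 1).map (fun i => pvCellB tablero i 0)
    primera = PySem.List.sorted primera (fun x => x) false
  else false

-- ===== PRECONDITION & SPEC =====
-- Pre_ admits full boards (≥ 4 rows with ≥ 4 entries each) and boards whose first row's first-4
-- prefix has a descent (both programs immediately return False there); other thin boards are
-- excluded: on them A raises IndexError, or returns False only because its interleaved scan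
-- short-circuits before the missing cell — there B raises IndexError instead.
def Pre_esta_ganado (tablero : List (List Int)) : Prop :=
  (4 ≤ tablero.length ∧ ∀ row ∈ tablero.take 4, 4 ≤ row.length) ∨
    ¬ ((tablero.headD []).take 4).Pairwise (fun a b => a ≤ b)
instance (tablero : List (List Int)) : Decidable (Pre_esta_ganado tablero) := by
  unfold Pre_esta_ganado; infer_instance

def pvWitness_esta_ganado : List (List Int) :=
  [[1, 2, 3, 4], [2, 5, 6, 7], [3, 8, 9, 10], [4, 11, 12, 13]]

def Spec_esta_ganado (tablero : List (List Int)) (out : Bool) : Prop := out = esta_ganado_alt tablero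
instance (tablero : List (List Int)) (out : Bool) : Decidable (Spec_esta_ganado tablero out) := by unfold Spec_esta_ganado; infer_instance

-- ===== CLAIM (what is proved, stated in full; the proofs are below) =====
def Claim_equal_esta_ganado : Prop := ∀ (tablero : List (List Int)), Dom_esta_ganado tablero → Pre_esta_ganado tablero → Spec_esta_ganado tablero (esta_ganado tablero)

-- ===== LEMMAS AND PROOFS =====

-- a 4-element list equals its own sort iff it is nondecreasing
theorem pvSorted4 (a b c d : Int) :
    ([a, b, c, d] = PySem.List.sorted [a, b, c, d] (fun x => x) false) ↔
      a ≤ b ∧ b ≤ c ∧ c ≤ d := by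
  constructor
  · intro h
    have hp := PySem.List.sorted_pairwise (xs := [a, b, c, d]) (key := fun x => x)
    rw [← h] at hp
    simp only [List.pairwise_cons, List.mem_cons, List.not_mem_nil] at hp
    have h1 := hp.1 b (by simp)
    have h2 := hp.2.1 c (by simp)
    have h3 := hp.2.2.1 d (by simp)
    omega
  · intro h
    apply Eq.symm
    apply PySem.List.sorted_eq_self_of_pairwise
    refine List.pairwise_cons.mpr ⟨?_, List.pairwise_cons.mpr ⟨?_, List.pairwise_cons.mpr
      ⟨?_, List.pairwise_singleton _ _⟩⟩⟩ <;> intro x hx <;> simp at hx <;> omega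

-- the reference Bool both ports are reduced to on full boards
def pvE (t : List (List Int)) : Bool :=
  decide (pvCellA t 0 0 ≤ pvCellA t 0 1 ∧ pvCellA t 0 1 ≤ pvCellA t 0 2 ∧ pvCellA t 0 2 ≤ pvCellA t 0 3) &&
  decide (pvCellA t 1 0 ≤ pvCellA t 1 1 ∧ pvCellA t 1 1 ≤ pvCellA t 1 2 ∧ pvCellA t 1 2 ≤ pvCellA t 1 3) &&
  decide (pvCellA t 2 0 ≤ pvCellA t 2 1 ∧ pvCellA t 2 1 ≤ pvCellA t 2 2 ∧ pvCellA t 2 2 ≤ pvCellA t 2 3) &&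
  decide (pvCellA t 3 0 ≤ pvCellA t 3 1 ∧ pvCellA t 3 1 ≤ pvCellA t 3 2 ∧ pvCellA t 3 2 ≤ pvCellA t 3 3) &&
  decide (pvCellA t 0 0 ≤ pvCellA t 1 0 ∧ pvCellA t 1 0 ≤ pvCellA t 2 0 ∧ pvCellA t 2 0 ≤ pvCellA t 3 0)

theorem pvCellB_eq : pvCellB = pvCellA := rfl

theorem pvViol_eq (t : List (List Int)) (i : Int) :
    pvRowViolA t i 0 =
      !decide (pvCellA t i 0 ≤ pvCellA t i 1 ∧ pvCellA t i 1 ≤ pvCellA t i 2 ∧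
               pvCellA t i 2 ≤ pvCellA t i 3) := by
  rw [pvRowViolA, pvRowViolA, pvRowViolA, pvRowViolA]
  norm_num
  rw [Bool.eq_iff_iff]
  simp only [Bool.or_eq_true, Bool.not_eq_eq_eq_not, Bool.not_true, decide_eq_true_eq,
    decide_eq_false_iff_not]
  omega

theorem pvA_eq (t : List (List Int)) : esta_ganado t = pvE t := by
  show pvLoopA t 0 = pvE t
  rw [pvLoopA, pvLoopA, pvLoopA, pvLoopA, pvLoopA]
  simp only [pvViol_eq]
  norm_num [pvE]
  rw [Bool.eq_iff_iff]
  simp only [Bool.and_eq_true, Bool.not_eq_eq_eq_not, Bool.not_true, decide_eq_true_eq,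
    decide_eq_false_iff_not]
  omega

theorem pvSlice4 (xs : List Int) : PySem.List.slice xs none (some 4) = xs.take 4 := by
  simpa using PySem.List.slice_to_natCast (xs := xs) (b := 4)

theorem pvHead (t : List (List Int)) : (PySem.List.pyGet? t 0).getD [] = t.headD [] := by
  cases t <;> simp [pysem]

-- a row with ≥ 4 entries: its first-4 prefix written through the cell accessor
theorem pvRow4 (row : List Int) (h : 4 ≤ row.length) :
    row.take 4 = [(PySem.List.pyGet? row 0).getD 0, (PySem.List.pyGet? row 1).getD 0,
      (PySem.List.pyGet? row 2).getD 0, (PySem.List.pyGet? row 3).getD 0] := by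
  rcases row with _ | ⟨a, _ | ⟨b, _ | ⟨c, _ | ⟨d, rest⟩⟩⟩⟩
  · simp at h
  · simp at h
  · simp at h
  · simp at h
  · rw [show (4:Nat) = 0+1+1+1+1 from rfl]
    simp [List.take_succ_cons, pysem]

theorem pvFila (t : List (List Int)) (i : Int)
    (h : 4 ≤ ((PySem.List.pyGet? t i).getD []).length) :
    PySem.List.slice ((PySem.List.pyGet? t i).getD []) none (some 4) =
      [pvCellA t i 0, pvCellA t i 1, pvCellA t i 2, pvCellA t i 3] := by
  rw [pvSlice4]; exact pvRow4 _ h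

-- a list equal to its own sort is nondecreasing
theorem pvSortedPW (l : List Int) (h : l = PySem.List.sorted l (fun x => x) false) :
    l.Pairwise (fun a b => a ≤ b) := by
  have hp := PySem.List.sorted_pairwise (xs := l) (key := fun x => x)
  rw [← h] at hp
  simpa using hp

-- if A's (default-padded) adjacent chain on a row's first 4 cells holds, the first-4 prefix is nondecreasing
theorem pvConjPW (row : List Int)
    (h : (PySem.List.pyGet? row 0).getD 0 ≤ (PySem.List.pyGet? row 1).getD 0 ∧
         (PySem.List.pyGet? row 1).getD 0 ≤ (PySem.List.pyGet? row 2).getD 0 ∧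
         (PySem.List.pyGet? row 2).getD 0 ≤ (PySem.List.pyGet? row 3).getD 0) :
    (row.take 4).Pairwise (fun a b => a ≤ b) := by
  rcases row with _ | ⟨a, _ | ⟨b, _ | ⟨c, _ | ⟨d, rest⟩⟩⟩⟩
  · simp
  · simp
  · simp [pysem] at h
    simp [h]
  · simp [pysem] at h
    rw [show (4:Nat) = 0+1+1+1+1 from rfl]
    simp [List.take_succ_cons]
    omega
  · simp [pysem] at h
    rw [show (4:Nat) = 0+1+1+1+1 from rfl]
    simp [List.take_succ_cons]
    omega

theorem pvB_full (t : List (List Int)) (hlen : 4 ≤ t.length)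
    (hrows : ∀ row ∈ t.take 4, 4 ≤ row.length) : esta_ganado_alt t = pvE t := by
  have L : ∀ n : Nat, n < 4 → 4 ≤ ((PySem.List.pyGet? t (n : Int)).getD []).length := by
    intro n hn
    rw [PySem.List.pyGet?_ofNat t n (by omega)]
    simp only [Option.getD_some]
    refine hrows _ ?_
    have h1 : n < (t.take 4).length := by rw [List.length_take]; omega
    have h2 : (t.take 4)[n]'h1 = t[n]'(by omega) := List.getElem_take
    rw [← h2]
    exact List.getElem_mem h1
  have L0 := L 0 (by omega); have L1 := L 1 (by omega)
  have L2 := L 2 (by omega); have L3 := L 3 (by omega)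
  norm_num at L0 L1 L2 L3
  have hf0 := pvFila t 0 L0; have hf1 := pvFila t 1 L1
  have hf2 := pvFila t 2 L2; have hf3 := pvFila t 3 L3
  have hr : PySem.List.pyRange 0 4 1 = [0, 1, 2, 3] := by decide
  show (if pvLoopB t 0 then _ else false) = pvE t
  rw [pvLoopB, pvLoopB, pvLoopB, pvLoopB, pvLoopB]
  norm_num [hf0, hf1, hf2, hf3, hr, pvCellB_eq, pvSorted4, pvE]
  rw [Bool.eq_iff_iff]
  simp only [Bool.and_eq_true, decide_eq_true_eq]
  omega

theorem pvB_desc (t : List (List Int))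
    (hdesc : ¬ ((t.headD []).take 4).Pairwise (fun a b => a ≤ b)) :
    esta_ganado_alt t = false := by
  have hne : (t.headD []).take 4 ≠
      PySem.List.sorted ((t.headD []).take 4) (fun x => x) false :=
    fun he => hdesc (pvSortedPW _ he)
  have h0 : pvLoopB t 0 = false := by
    rw [pvLoopB]
    simp only [Nat.cast_zero, pvHead, pvSlice4]
    rw [if_pos (show (0:Nat) < 4 by omega), if_pos hne]
  show (if pvLoopB t 0 then _ else false) = false
  rw [h0]
  simp

theorem pvA_desc (t : List (List Int))
    (hdesc : ¬ ((t.headD []).take 4).Pairwise (fun a b => a ≤ b)) :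
    esta_ganado t = false := by
  rw [pvA_eq]
  have hconj : ¬ (pvCellA t 0 0 ≤ pvCellA t 0 1 ∧ pvCellA t 0 1 ≤ pvCellA t 0 2 ∧
      pvCellA t 0 2 ≤ pvCellA t 0 3) := by
    intro hc
    refine hdesc (pvConjPW _ ?_)
    simp only [pvCellA, pvHead] at hc
    exact hc
  simp [pvE, hconj]

-- ===== VERDICT (by name: the statement is the Claim_ definition above) =====
theorem esta_ganado_spec : Claim_equal_esta_ganado := by
  intro t _ hpre
  show esta_ganado t = esta_ganado_alt t
  rcases hpre with ⟨hlen, hrows⟩ | hdesc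
  · rw [pvA_eq, pvB_full t hlen hrows]
  · rw [pvA_desc t hdesc, pvB_desc t hdesc]
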